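-- pv_equiv track=rewrite | github.com/BioIT-CEITEC/plant_sequencing_database | code_knowledge.py | query_graph
-- ===== SOURCE A (Python) =====
-- def query_graph(graph, node_id=None, node_type=None):
--     results = []
--     for nid, node_data in graph["nodes"].items():
--         if node_id and nid != node_id:
--             continue
--         if node_type and node_data["type"] != node_type:
--             continue
--         results.append((nid, node_data))
--     return results
-- ===== SOURCE B (Python) =====
-- def query_graph(graph, node_id=None, node_type=None):
--     nodes = graph["nodes"]
--     if node_id:
--         node_data = nodes.get(node_id)
--         if node_data is None:
--             return []
--         if node_type and node_data["type"] != node_type: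
--             return []
--         return [(node_id, node_data)]
--     if node_type:
--         return [(nid, nd) for nid, nd in nodes.items() if nd["type"] == node_type]
--     return list(nodes.items())
-- ===== Notes on version B (the rewrite author's own statement) =====
-- stated objective: faster
-- what changed: When node_id is truthy, B replaces A's full scan of all nodes with a single keyed dict lookup (nodes.get(node_id)) and returns the at-most-one-element result directly; only when node_id is falsy does B scan, with the type filter applied in a comprehension or list(nodes.items()) with no filtering at all.
import Mathlib
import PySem

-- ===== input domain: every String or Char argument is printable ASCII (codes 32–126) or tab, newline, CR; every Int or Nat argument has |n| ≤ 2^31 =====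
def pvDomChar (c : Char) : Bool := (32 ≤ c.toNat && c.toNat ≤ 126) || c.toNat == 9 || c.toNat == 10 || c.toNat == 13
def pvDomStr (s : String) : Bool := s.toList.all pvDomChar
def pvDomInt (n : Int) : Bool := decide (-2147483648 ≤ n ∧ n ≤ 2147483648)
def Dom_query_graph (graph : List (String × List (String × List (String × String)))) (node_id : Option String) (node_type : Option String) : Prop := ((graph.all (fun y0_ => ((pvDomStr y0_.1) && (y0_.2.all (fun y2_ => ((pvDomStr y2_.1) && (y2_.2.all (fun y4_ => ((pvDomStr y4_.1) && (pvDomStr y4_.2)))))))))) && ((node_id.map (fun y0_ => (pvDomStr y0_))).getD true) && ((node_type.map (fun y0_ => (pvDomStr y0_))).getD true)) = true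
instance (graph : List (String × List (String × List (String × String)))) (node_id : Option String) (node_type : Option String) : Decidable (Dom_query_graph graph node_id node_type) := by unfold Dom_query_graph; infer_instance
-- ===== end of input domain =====

-- B replaces A's unconditional full scan by a direct keyed lookup when node_id is truthy;
-- the scan (with only the type filter) remains for falsy node_id.

-- Python truthiness of an Optional[str]: None and "" are falsy.
def pvTruthy (o : Option String) : Bool := !((o.getD "") == "")

-- Shared decoding of the input under the type convention: graph["nodes"] as a dict
-- (last value wins for a duplicated key, as in Python), each node_data likewise normalised.
def pvNodes (graph : List (String × List (String × List (String × String)))) :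
    PySem.Dict String (List (String × String)) :=
  PySem.Dict.ofList
    (((PySem.Dict.ofList graph).getD "nodes" []).map
      (fun q => (q.1, (PySem.Dict.ofList q.2).items)))

-- node_data["type"] (total form; Pre_ guarantees the key is present wherever it is read)
def pvTypeOf (node_data : List (String × String)) : String :=
  (PySem.Dict.ofList node_data).getD "type" ""

-- ===== PORT A =====
def query_graph (graph : List (String × List (String × List (String × String)))) (node_id : Option String) (node_type : Option String) : List (String × (List (String × String))) :=
  (pvNodes graph).items.foldl
    (fun results p =>
      if pvTruthy node_id && !(p.1 == node_id.getD "") then results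
      else if pvTruthy node_type && !(pvTypeOf p.2 == node_type.getD "") then results
      else results ++ [p]) []

-- ===== PORT B =====
def query_graph_alt (graph : List (String × List (String × List (String × String)))) (node_id : Option String) (node_type : Option String) : List (String × (List (String × String))) :=
  let nodes := pvNodes graph
  if pvTruthy node_id then
    match nodes.get? (node_id.getD "") with
    | none => []
    | some node_data =>
      if pvTruthy node_type && !(pvTypeOf node_data == node_type.getD "") then []
      else [(node_id.getD "", node_data)]
  else if pvTruthy node_type then
    nodes.items.filter (fun p => pvTypeOf p.2 == node_type.getD "")
  else
    nodes.items

-- ===== PRECONDITION & SPEC =====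
-- Pre_ excludes exactly the inputs where the Python A raises: a KeyError on graph["nodes"],
-- or a KeyError on node_data["type"] for a node that passes the node_id filter while
-- node_type is truthy.
def Pre_query_graph (graph : List (String × List (String × List (String × String)))) (node_id : Option String) (node_type : Option String) : Prop :=
  (PySem.Dict.ofList graph).contains "nodes" = true ∧
  (pvTruthy node_type = true →
    ∀ p ∈ (pvNodes graph).items,
      (pvTruthy node_id = false ∨ p.1 = node_id.getD "") →
      (PySem.Dict.ofList p.2).contains "type" = true)
instance (graph : List (String × List (String × List (String × String)))) (node_id : Option String) (node_type : Option String) : Decidable (Pre_query_graph graph node_id node_type) := by unfold Pre_query_graph; infer_instance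
def pvWitness_query_graph : (List (String × List (String × List (String × String)))) × Option String × Option String :=
  ([("nodes", [("a", [("type", "x")]), ("b", [("type", "y")])])], some "a", some "x")
def Spec_query_graph (graph : List (String × List (String × List (String × String)))) (node_id : Option String) (node_type : Option String) (out : List (String × (List (String × String)))) : Prop := out = query_graph_alt graph node_id node_type
instance (graph : List (String × List (String × List (String × String)))) (node_id : Option String) (node_type : Option String) (out : List (String × (List (String × String)))) : Decidable (Spec_query_graph graph node_id node_type out) := by unfold Spec_query_graph; infer_instance

-- ===== CLAIM (what is proved, stated in full; the proofs are below) =====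
def Claim_equal_query_graph : Prop := ∀ (graph : List (String × List (String × List (String × String)))) (node_id : Option String) (node_type : Option String), Dom_query_graph graph node_id node_type → Pre_query_graph graph node_id node_type → Spec_query_graph graph node_id node_type (query_graph graph node_id node_type)

-- ===== LEMMAS AND PROOFS =====

-- A's loop is a filter with the two (negated) guards.
theorem loopA (node_id node_type : Option String)
    (l : List (String × List (String × String)))
    (acc : List (String × List (String × String))) :
    l.foldl
      (fun results p =>
        if pvTruthy node_id && !(p.1 == node_id.getD "") then results
        else if pvTruthy node_type && !(pvTypeOf p.2 == node_type.getD "") then results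
        else results ++ [p]) acc
    = acc ++ l.filter
        (fun p => !(pvTruthy node_id && !(p.1 == node_id.getD "")) &&
                  !(pvTruthy node_type && !(pvTypeOf p.2 == node_type.getD ""))) := by
  induction l generalizing acc with
  | nil => simp
  | cons p t ih =>
    rw [List.foldl_cons]
    cases hg1 : (pvTruthy node_id && !(p.1 == node_id.getD "")) with
    | true =>
      rw [if_pos rfl, ih]
      simp only [List.filter_cons]
      rw [hg1]
      simp
    | false =>
      rw [if_neg (by simp)]
      cases hg2 : (pvTruthy node_type && !(pvTypeOf p.2 == node_type.getD "")) with
      | true =>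
        rw [if_pos rfl, ih]
        simp only [List.filter_cons]
        rw [hg1, hg2]
        simp
      | false =>
        rw [if_neg (by simp), ih]
        simp only [List.filter_cons]
        rw [hg1, hg2]
        simp

-- In a list whose first components are nodup and which contains (k, v),
-- filtering on key k yields exactly [(k, v)].
theorem filter_fst_nodup {β : Type} (l : List (String × β)) (k : String) (v : β)
    (hnd : (l.map Prod.fst).Nodup) (hmem : (k, v) ∈ l) :
    l.filter (fun p => p.1 == k) = [(k, v)] := by
  induction l with
  | nil => simp at hmem
  | cons a t ih =>
    simp only [List.map_cons, List.nodup_cons] at hnd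
    by_cases hk : a.1 = k
    · have hv : a = (k, v) := by
        rcases List.mem_cons.mp hmem with h | h
        · exact h.symm
        · exact absurd (by simpa [hk] using List.mem_map_of_mem (f := Prod.fst) h) hnd.1
      have ht : t.filter (fun p => p.1 == k) = [] := by
        apply List.filter_eq_nil_iff.mpr
        intro p hp
        have : p.1 ∈ t.map Prod.fst := List.mem_map_of_mem hp
        simp only [beq_iff_eq]
        intro hpk
        exact hnd.1 (by simpa [hpk, hk] using this)
      simp [hv, ht]
    · have hmem' : (k, v) ∈ t := by
        rcases List.mem_cons.mp hmem with h | h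
        · exact absurd (congrArg Prod.fst h.symm) hk
        · exact h
      simp [hk, ih hnd.2 hmem']

-- filtering a dict's items on a key k is governed by get? k.
theorem filter_key {β : Type} (d : PySem.Dict String β) (k : String) (hnd : d.keys.Nodup) :
    d.items.filter (fun p => p.1 == k)
      = (d.get? k).elim [] (fun v => [(k, v)]) := by
  cases hg : d.get? k with
  | none =>
    have hk : k ∉ d.keys := (PySem.Dict.get?_eq_none_iff_not_mem_keys d k).mp hg
    simp only [Option.elim]
    apply List.filter_eq_nil_iff.mpr
    intro p hp
    simp only [beq_iff_eq]
    intro hpk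
    exact hk (hpk ▸ PySem.Dict.mem_keys_of_mem_items d hp)
  | some v =>
    have hmem : (k, v) ∈ d.items := PySem.Dict.mem_items_of_get?_eq_some d hg
    have hnd' : (d.items.map Prod.fst).Nodup := by
      simpa [PySem.Dict.keys] using hnd
    simpa using filter_fst_nodup d.items k v hnd' hmem

-- ===== VERDICT (by name: the statement is the Claim_ definition above) =====
theorem query_graph_spec : Claim_equal_query_graph := by
  intro graph node_id node_type _hDom _hPre
  unfold Spec_query_graph query_graph query_graph_alt
  rw [loopA]
  have hnd : (pvNodes graph).keys.Nodup := PySem.Dict.nodup_keys_ofList _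
  by_cases hid : pvTruthy node_id = true
  · -- keyed-lookup branch
    have hsplit :
        (pvNodes graph).items.filter
          (fun p => !(pvTruthy node_id && !(p.1 == node_id.getD "")) &&
                    !(pvTruthy node_type && !(pvTypeOf p.2 == node_type.getD "")))
        = ((pvNodes graph).items.filter (fun p => p.1 == node_id.getD "")).filter
            (fun p => !(pvTruthy node_type && !(pvTypeOf p.2 == node_type.getD ""))) := by
      rw [List.filter_filter]
      apply List.filter_congr
      intro p _
      simp [hid, Bool.and_comm]
    rw [List.nil_append, hsplit, filter_key _ _ hnd]
    cases hg : (pvNodes graph).get? (node_id.getD "") with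
    | none => simp [hid, hg]
    | some node_data =>
      by_cases ht : (pvTruthy node_type && !(pvTypeOf node_data == node_type.getD "")) = true
      · have ht' : pvTruthy node_type = true ∧ ¬ pvTypeOf node_data = node_type.getD "" := by
          simpa using ht
        simp [hid, hg, ht'.1, ht'.2]
      · have ht1 : pvTruthy node_type = true → pvTypeOf node_data = node_type.getD "" := by
          intro h
          by_contra hne
          exact ht (by simp [h, hne])
        by_cases hty : pvTruthy node_type = true
        · simp [hid, hg, hty, ht1 hty]
        · simp [hid, hg, (by simpa using hty : pvTruthy node_type = false)]
  · -- scan branch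
    have hid' : pvTruthy node_id = false := by simpa using hid
    by_cases hty : pvTruthy node_type = true
    · simp only [List.nil_append, hid', hty]
      apply List.filter_congr
      intro p _
      simp
    · have hty' : pvTruthy node_type = false := by simpa using hty
      simp [hid', hty']
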